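-- pv_equiv track=rewrite | github.com/c2lv/BOJAutoPush | 백준/Gold/2448. 별 찍기 － 11/별 찍기 － 11.py | star_stamp
-- ===== SOURCE A (Python) =====
-- def star_stamp(n):
--     if n == 3:
--         return [
--             "  *   ",
--             " * *  ",
--             "***** "
--         ]
--     before = star_stamp(n//2)
--     line = []
--     for b in before:
--         line.append(" "*(n//2) + b + " "*(n//2))
--     for b in before:
--         line.append(2*b)
--     return line
-- ===== SOURCE B (Python) =====
-- def star_stamp(n):
--     # bottom-up: record the sizes by halving, then grow the triangle iteratively
--     sizes = []
--     m = n
--     while m != 3: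
--         sizes.append(m)
--         m //= 2
--     res = ["  *   ", " * *  ", "***** "]
--     for s in reversed(sizes):
--         pad = " " * (s // 2)
--         res = [pad + l + pad for l in res] + [2 * l for l in res]
--     return res
-- ===== Notes on version B (the rewrite author's own statement) =====
-- stated objective: alternative
-- what changed: Replaces the top-down recursion by an explicit bottom-up loop: the halving size sequence is recorded first, then the triangle is grown iteratively from the base case over the sizes smallest-to-largest.
import Mathlib
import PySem

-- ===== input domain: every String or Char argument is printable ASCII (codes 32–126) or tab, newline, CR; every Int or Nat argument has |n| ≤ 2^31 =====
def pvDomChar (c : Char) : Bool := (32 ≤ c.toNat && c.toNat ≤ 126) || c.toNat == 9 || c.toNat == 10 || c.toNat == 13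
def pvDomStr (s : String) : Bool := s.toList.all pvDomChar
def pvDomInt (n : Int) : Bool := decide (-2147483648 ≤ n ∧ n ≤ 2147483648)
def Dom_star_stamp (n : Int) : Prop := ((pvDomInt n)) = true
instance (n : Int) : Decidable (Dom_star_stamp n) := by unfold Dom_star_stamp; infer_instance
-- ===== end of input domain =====

-- B replaces A's top-down recursion by an explicit bottom-up loop over the halving size sequence (alternative decomposition, same cost).

-- ===== PORT A =====
-- A's self-recursion on n//2 is not structurally decreasing for arbitrary Int,
-- so the transliteration is guarded by fuel (enough for every input Pre_ admits;
-- Python raises RecursionError exactly where the fuel guard would matter).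
def starStampFuel : Nat → Int → List String
  | 0, _ => []
  | f + 1, n =>
    if n = 3 then ["  *   ", " * *  ", "***** "]
    else
      let before := starStampFuel f (PySem.Int.floordiv n 2)
      (before.map fun b =>
        String.ofList (PySem.List.pyRepeat [' '] (PySem.Int.floordiv n 2) ++ b.toList
          ++ PySem.List.pyRepeat [' '] (PySem.Int.floordiv n 2)))
      ++ (before.map fun b => String.ofList (b.toList ++ b.toList))

def star_stamp (n : Int) : List String := starStampFuel (n.toNat + 1) n

-- ===== PORT B =====
-- the `while m != 3` loop recording the sizes, fuel-guarded like A's recursion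
def starSizes : Nat → Int → List Int
  | 0, _ => []
  | f + 1, m => if m = 3 then [] else m :: starSizes f (PySem.Int.floordiv m 2)

def star_stamp_alt (n : Int) : List String :=
  let sizes := starSizes (n.toNat + 1) n
  sizes.reverse.foldl
    (fun res s =>
      let pad := PySem.List.pyRepeat [' '] (PySem.Int.floordiv s 2)
      (res.map fun l => String.ofList (pad ++ l.toList ++ pad))
        ++ (res.map fun l => String.ofList (l.toList ++ l.toList)))
    ["  *   ", " * *  ", "***** "]

-- ===== PRECONDITION & SPEC =====
-- Python A returns normally exactly when the floor-halving chain from n reaches 3,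
-- i.e. n // 2^k = 3 for some k (elsewhere it recurses forever, raising RecursionError);
-- k < 32 covers every such n in Dom (|n| ≤ 2^31 forces the witnessing k ≤ 29).
def Pre_star_stamp (n : Int) : Prop := ∃ k : Nat, k < 32 ∧ PySem.Int.floordiv n (2 ^ k) = 3
instance (n : Int) : Decidable (Pre_star_stamp n) := by unfold Pre_star_stamp; infer_instance
def pvWitness_star_stamp : Int := 6

def Spec_star_stamp (n : Int) (out : List String) : Prop := out = star_stamp_alt n
instance (n : Int) (out : List String) : Decidable (Spec_star_stamp n out) := by unfold Spec_star_stamp; infer_instance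

-- ===== CLAIM (what is proved, stated in full; the proofs are below) =====
def Claim_equal_star_stamp : Prop := ∀ (n : Int), Dom_star_stamp n → Pre_star_stamp n → Spec_star_stamp n (star_stamp n)

-- ===== LEMMAS AND PROOFS =====

def starStep (res : List String) (s : Int) : List String :=
  let pad := PySem.List.pyRepeat [' '] (PySem.Int.floordiv s 2)
  (res.map fun l => String.ofList (pad ++ l.toList ++ pad))
    ++ (res.map fun l => String.ofList (l.toList ++ l.toList))

lemma star_alt_eq (n : Int) :
    star_stamp_alt n = (starSizes (n.toNat + 1) n).reverse.foldl starStep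
      ["  *   ", " * *  ", "***** "] := rfl

lemma main_lemma (k : Nat) : ∀ (n : Int) (fa fb : Nat), k < fa → k < fb →
    PySem.Int.floordiv n (2 ^ k) = 3 →
    starStampFuel fa n =
      (starSizes fb n).reverse.foldl starStep ["  *   ", " * *  ", "***** "] := by
  induction k with
  | zero =>
    intro n fa fb hfa hfb hp
    have hn : n = 3 := by
      rwa [pow_zero, PySem.Int.floordiv_eq_ediv_of_pos (by norm_num), Int.ediv_one] at hp
    subst hn
    obtain ⟨fa', rfl⟩ := Nat.exists_eq_succ_of_ne_zero (by omega : fa ≠ 0)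
    obtain ⟨fb', rfl⟩ := Nat.exists_eq_succ_of_ne_zero (by omega : fb ≠ 0)
    simp [starStampFuel, starSizes]
  | succ k ih =>
    intro n fa fb hfa hfb hp
    obtain ⟨fa', rfl⟩ := Nat.exists_eq_succ_of_ne_zero (by omega : fa ≠ 0)
    obtain ⟨fb', rfl⟩ := Nat.exists_eq_succ_of_ne_zero (by omega : fb ≠ 0)
    have h2k : (0 : Int) < 2 ^ k := by positivity
    have hb := (PySem.Int.floordiv_eq_iff_of_pos (by positivity)).mp hp
    rw [pow_succ] at hb
    have hq := (PySem.Int.floordiv_eq_iff_of_pos (by norm_num : (0:Int) < 2)).mp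
      (rfl : PySem.Int.floordiv n 2 = PySem.Int.floordiv n 2)
    have hstep : PySem.Int.floordiv (PySem.Int.floordiv n 2) (2 ^ k) = 3 := by
      apply (PySem.Int.floordiv_eq_iff_of_pos h2k).mpr
      constructor <;> nlinarith [hq.1, hq.2, hb.1, hb.2]
    have hne : n ≠ 3 := by nlinarith [hb.1]
    rw [starStampFuel, starSizes, if_neg hne, if_neg hne]
    simp only [List.reverse_cons, List.foldl_append, List.foldl_cons, List.foldl_nil]
    rw [ih (PySem.Int.floordiv n 2) fa' fb' (by omega) (by omega) hstep]
    unfold starStep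
    rfl

lemma fuel_enough (k : Nat) (n : Int) (hp : PySem.Int.floordiv n (2 ^ k) = 3) :
    k < n.toNat + 1 := by
  have h2k : (0 : Int) < 2 ^ k := by positivity
  have h1 := ((PySem.Int.floordiv_eq_iff_of_pos (by positivity)).mp hp).1
  have hn0 : (0 : Int) ≤ n := by nlinarith
  have hle : (2 ^ k : Nat) ≤ n.toNat := by
    rw [Int.le_toNat hn0]; push_cast; nlinarith
  have := Nat.lt_two_pow_self (n := k)
  omega

-- ===== VERDICT (by name: the statement is the Claim_ definition above) =====
theorem star_stamp_spec : Claim_equal_star_stamp := by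
  intro n _ hpre
  obtain ⟨k, _, hp⟩ := hpre
  unfold Spec_star_stamp star_stamp
  rw [star_alt_eq]
  exact main_lemma k n _ _ (fuel_enough k n hp) (fuel_enough k n hp) hp
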